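-- pv_equiv track=rewrite | github.com/wuchanghui5220/ibtc | scripts/nlc/nlc.py | determine_cable_length_category
-- ===== SOURCE A (Python) =====
-- def determine_cable_length_category(length_cm):
--     length_cm = int(length_cm)
--     # 定义区间值（以厘米为单位）
--     intervals = [500, 1000, 1500, 2000, 3000, 5000, 10000]
--     labels = ['5m', '10m', '15m', '20m', '30m', '50m', '100m']
--
--     for i, interval in enumerate(intervals):
--         if length_cm <= interval:
--             return labels[i]
--
--     # 如果长度超过了最大区间，返回最大的标签
--     return labels[-1]
-- ===== SOURCE B (Python) =====
-- def determine_cable_length_category(length_cm):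
--     length_cm = int(length_cm)
--     intervals = [500, 1000, 1500, 2000, 3000, 5000, 10000]
--     labels = ['5m', '10m', '15m', '20m', '30m', '50m', '100m']
--     # binary search for the leftmost threshold >= length_cm (bisect_left)
--     lo, hi = 0, len(intervals)
--     while lo < hi:
--         mid = (lo + hi) // 2
--         if intervals[mid] < length_cm:
--             lo = mid + 1
--         else:
--             hi = mid
--     return labels[min(lo, len(labels) - 1)]
-- ===== Notes on version B (the rewrite author's own statement) =====
-- stated objective: alternative
-- what changed: Replaces the linear scan over the threshold table with a hand-written bisect_left binary search over the sorted thresholds, indexing the label table once (clamped to the last label for over-range lengths).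
import Mathlib
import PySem

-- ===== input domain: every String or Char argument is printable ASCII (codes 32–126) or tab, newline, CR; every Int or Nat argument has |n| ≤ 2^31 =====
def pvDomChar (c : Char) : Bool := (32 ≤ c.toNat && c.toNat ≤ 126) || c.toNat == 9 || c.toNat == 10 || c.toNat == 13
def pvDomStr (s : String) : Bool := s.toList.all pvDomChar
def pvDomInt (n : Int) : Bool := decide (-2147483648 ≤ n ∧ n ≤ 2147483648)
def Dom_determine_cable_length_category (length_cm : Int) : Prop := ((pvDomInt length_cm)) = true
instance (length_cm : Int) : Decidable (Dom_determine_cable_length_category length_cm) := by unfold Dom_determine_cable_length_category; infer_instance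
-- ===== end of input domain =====

-- B replaces A's linear scan over the thresholds with a bisect_left binary search; same return value.
-- ===== PORT A =====
-- linear scan: first interval with length_cm <= interval yields its label; past the end, labels[-1]
def pvScanA (length_cm : Int) : List (Int × String) → String
  | [] => "100m"          -- labels[-1]
  | (interval, label) :: rest =>
      if length_cm ≤ interval then label else pvScanA length_cm rest

def determine_cable_length_category (length_cm : Int) : String :=
  pvScanA length_cm [(500, "5m"), (1000, "10m"), (1500, "15m"), (2000, "20m"),
                     (3000, "30m"), (5000, "50m"), (10000, "100m")]

-- ===== PORT B =====
-- while lo < hi: mid = (lo+hi)//2; if intervals[mid] < x: lo = mid+1 else hi = mid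
def pvBisectB (intervals : List Int) (x : Int) (lo hi : Nat) : Nat :=
  if lo < hi then
    let mid := (lo + hi) / 2
    if intervals.getD mid 0 < x then pvBisectB intervals x (mid + 1) hi
    else pvBisectB intervals x lo mid
  else lo
termination_by hi - lo
decreasing_by all_goals omega

def determine_cable_length_category_alt (length_cm : Int) : String :=
  let intervals : List Int := [500, 1000, 1500, 2000, 3000, 5000, 10000]
  let labels : List String := ["5m", "10m", "15m", "20m", "30m", "50m", "100m"]
  let lo := pvBisectB intervals length_cm 0 intervals.length
  labels.getD (min lo (labels.length - 1)) ""

-- ===== PRECONDITION & SPEC =====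
def Spec_determine_cable_length_category (length_cm : Int) (out : String) : Prop := out = determine_cable_length_category_alt length_cm
instance (length_cm : Int) (out : String) : Decidable (Spec_determine_cable_length_category length_cm out) := by unfold Spec_determine_cable_length_category; infer_instance

-- ===== CLAIM (what is proved, stated in full; the proofs are below) =====
def Claim_equal_determine_cable_length_category : Prop := ∀ (length_cm : Int), Dom_determine_cable_length_category length_cm → Spec_determine_cable_length_category length_cm (determine_cable_length_category length_cm)

-- ===== LEMMAS AND PROOFS =====

-- ===== VERDICT (by name: the statement is the Claim_ definition above) =====
-- evaluation of the binary search on the fixed 7-element threshold table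
lemma pvBisectB_eval (x : Int) :
    pvBisectB [500, 1000, 1500, 2000, 3000, 5000, 10000] x 0 7 =
      if x ≤ 500 then 0 else if x ≤ 1000 then 1 else if x ≤ 1500 then 2
      else if x ≤ 2000 then 3 else if x ≤ 3000 then 4 else if x ≤ 5000 then 5
      else if x ≤ 10000 then 6 else 7 := by
  repeat' (first
    | omega
    | (rw [pvBisectB]; norm_num; try split_ifs))

theorem determine_cable_length_category_spec : Claim_equal_determine_cable_length_category := by
  intro x _
  unfold Spec_determine_cable_length_category determine_cable_length_category
    determine_cable_length_category_alt
  simp only [pvScanA, List.length_cons, List.length_nil]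
  rw [pvBisectB_eval]
  split_ifs <;> rfl
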